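-- pv_equiv track=rewrite | github.com/SemaA/substitutabilityScore | substitutability.py | getEdges
-- ===== SOURCE A (Python) =====
-- def isLinked(tuple1, tuple2):
--     """
--     These two nodes are linked if only one item is changed.
--
--     Return the edge (tuple1, tuple2)
--     """
--     set1 = set(tuple1)
--     set2 = set(tuple2)
--     len1 = len(tuple1)
--     len2 = len(tuple2)
--
--     if (len1 == len2) & (len(set.intersection(set1, set2)) == len1 - 1):
--         return (tuple1, tuple2)
--
--     elif (min(len1,len2) == max(len1, len2) - 1) & (len(set.intersection(set1, set2)) ==  min(len1,len2)):
--         return (tuple1, tuple2)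
--
-- def getEdges(nodelist):
--     edges = []
--     for i in range(len(nodelist)):
--         for j in range(i, len(nodelist)):
--             edge = isLinked(nodelist[i], nodelist[j])
--             if edge is not None:
--                 edges.append(edge)
--     return edges
-- ===== SOURCE B (Python) =====
-- def getEdges(nodelist):
--     # Bucket nodes into classes by (length, sorted de-duplicated elements); the link
--     # test only depends on that class, so it is evaluated once per pair of classes
--     # instead of once per pair of nodes.
--     n = len(nodelist)
--     keys = [(len(t), tuple(sorted(set(t)))) for t in nodelist]
--     reps = list(dict.fromkeys(keys))          # distinct classes, first-seen order
--     cls = [reps.index(k) for k in keys]       # class id of each node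
--     c = len(reps)
--
--     def linked(p, q):
--         (l1, s1), (l2, s2) = p, q
--         inter = len(set(s1) & set(s2))
--         if l1 == l2:
--             return inter == l1 - 1
--         return abs(l1 - l2) == 1 and inter == min(l1, l2)
--
--     table = [[linked(reps[a], reps[b]) for b in range(c)] for a in range(c)]
--     return [(nodelist[i], nodelist[j])
--             for i in range(n) for j in range(i, n)
--             if table[cls[i]][cls[j]]]
-- ===== Notes on version B (the rewrite author's own statement) =====
-- stated objective: alternative
-- what changed: B buckets nodes into equivalence classes keyed by (length, sorted de-duplicated elements), evaluates the set-based link test once per pair of classes in a boolean table, and emits edges by table lookup, instead of A's rebuilding both sets and intersecting them for every pair of nodes.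
import Mathlib
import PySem

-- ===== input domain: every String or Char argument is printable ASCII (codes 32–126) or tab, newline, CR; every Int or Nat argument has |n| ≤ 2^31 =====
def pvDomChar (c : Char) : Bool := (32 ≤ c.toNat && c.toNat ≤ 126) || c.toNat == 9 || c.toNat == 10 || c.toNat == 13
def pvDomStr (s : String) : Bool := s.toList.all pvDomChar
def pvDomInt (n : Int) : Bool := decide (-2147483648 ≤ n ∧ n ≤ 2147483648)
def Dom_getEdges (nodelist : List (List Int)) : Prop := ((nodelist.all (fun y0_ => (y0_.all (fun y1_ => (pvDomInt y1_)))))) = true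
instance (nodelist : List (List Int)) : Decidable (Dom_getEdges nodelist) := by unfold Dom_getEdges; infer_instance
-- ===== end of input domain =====

-- B buckets nodes into classes by (length, sorted de-duplicated elements) and evaluates the
-- link test once per pair of classes instead of once per pair of nodes (objective: alternative).

-- ===== PORT A =====
def isLinked (tuple1 tuple2 : List Int) : Option (List Int × List Int) :=
  let set1 : PySem.Set Int := PySem.Set.ofList tuple1
  let set2 : PySem.Set Int := PySem.Set.ofList tuple2
  let len1 : Int := tuple1.length
  let len2 : Int := tuple2.length
  if (len1 == len2) && (((PySem.Set.inter set1 set2).length : Int) == len1 - 1) then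
    some (tuple1, tuple2)
  else if (min len1 len2 == max len1 len2 - 1) && (((PySem.Set.inter set1 set2).length : Int) == min len1 len2) then
    some (tuple1, tuple2)
  else
    none

def getEdges (nodelist : List (List Int)) : List (List Int × List Int) :=
  (PySem.List.pyRange 0 (nodelist.length : Int) 1).foldl (fun edges i =>
    (PySem.List.pyRange i (nodelist.length : Int) 1).foldl (fun edges j =>
      match isLinked (PySem.List.pyGetD nodelist i []) (PySem.List.pyGetD nodelist j []) with
      | some edge => edges ++ [edge]
      | none => edges) edges) []

-- ===== PORT B =====
-- (len(t), tuple(sorted(set(t))))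
def keyOf (t : List Int) : Int × List Int :=
  ((t.length : Int), PySem.List.sorted (PySem.Set.ofList t) (fun x => x) false)

def linkedB (p q : Int × List Int) : Bool :=
  let inter : Int := ((PySem.Set.inter (PySem.Set.ofList p.2) (PySem.Set.ofList q.2)).length : Int)
  if p.1 == q.1 then inter == p.1 - 1
  else (|p.1 - q.1| == 1) && (inter == min p.1 q.1)

def pvKeys (nodelist : List (List Int)) : List (Int × List Int) := nodelist.map keyOf

def pvReps (nodelist : List (List Int)) : List (Int × List Int) := PySem.List.dedup (pvKeys nodelist)

def pvCls (nodelist : List (List Int)) : List Nat :=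
  (pvKeys nodelist).map (fun k => (PySem.List.index? (pvReps nodelist) k).getD 0)

def pvTable (nodelist : List (List Int)) : List (List Bool) :=
  (PySem.List.pyRange 0 ((pvReps nodelist).length : Int) 1).map (fun a =>
    (PySem.List.pyRange 0 ((pvReps nodelist).length : Int) 1).map (fun b =>
      linkedB (PySem.List.pyGetD (pvReps nodelist) a (0, []))
              (PySem.List.pyGetD (pvReps nodelist) b (0, []))))

def getEdges_alt (nodelist : List (List Int)) : List (List Int × List Int) :=
  (PySem.List.pyRange 0 (nodelist.length : Int) 1).flatMap (fun i =>
    ((PySem.List.pyRange i (nodelist.length : Int) 1).filter (fun j =>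
      PySem.List.pyGetD
        (PySem.List.pyGetD (pvTable nodelist) ((PySem.List.pyGetD (pvCls nodelist) i 0 : Nat) : Int) [])
        ((PySem.List.pyGetD (pvCls nodelist) j 0 : Nat) : Int) false)).map
      (fun j => (PySem.List.pyGetD nodelist i [], PySem.List.pyGetD nodelist j [])))

-- ===== PRECONDITION & SPEC =====
def Spec_getEdges (nodelist : List (List Int)) (out : List (List Int × List Int)) : Prop := out = getEdges_alt nodelist
instance (nodelist : List (List Int)) (out : List (List Int × List Int)) : Decidable (Spec_getEdges nodelist out) := by unfold Spec_getEdges; infer_instance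

-- ===== CLAIM (what is proved, stated in full; the proofs are below) =====
def Claim_equal_getEdges : Prop := ∀ (nodelist : List (List Int)), Dom_getEdges nodelist → Spec_getEdges nodelist (getEdges nodelist)

-- ===== LEMMAS AND PROOFS =====

-- the intersection size only depends on the underlying sets, so keyOf's sorted dedup keeps it
lemma inter_len_keyOf (t1 t2 : List Int) :
    (PySem.Set.inter (PySem.Set.ofList (keyOf t1).2) (PySem.Set.ofList (keyOf t2).2)).length
      = (PySem.Set.inter (PySem.Set.ofList t1) (PySem.Set.ofList t2)).length := by
  simp only [keyOf]
  have h1 : (PySem.List.sorted (PySem.Set.ofList t1) (fun x => x) false).Perm (PySem.Set.ofList t1) :=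
    PySem.List.sorted_perm _ _ _
  have h2 : (PySem.List.sorted (PySem.Set.ofList t2) (fun x => x) false).Perm (PySem.Set.ofList t2) :=
    PySem.List.sorted_perm _ _ _
  have n1 : (PySem.List.sorted (PySem.Set.ofList t1) (fun x => x) false).Nodup :=
    h1.nodup_iff.mpr (PySem.Set.nodup_ofList _)
  have n2 : (PySem.List.sorted (PySem.Set.ofList t2) (fun x => x) false).Nodup :=
    h2.nodup_iff.mpr (PySem.Set.nodup_ofList _)
  have e1 : PySem.Set.ofList (PySem.List.sorted (PySem.Set.ofList t1) (fun x => x) false)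
      = PySem.List.sorted (PySem.Set.ofList t1) (fun x => x) false :=
    PySem.Set.ofList_eq_self_of_nodup _ n1
  have e2 : PySem.Set.ofList (PySem.List.sorted (PySem.Set.ofList t2) (fun x => x) false)
      = PySem.List.sorted (PySem.Set.ofList t2) (fun x => x) false :=
    PySem.Set.ofList_eq_self_of_nodup _ n2
  rw [e1, e2]
  unfold PySem.Set.inter
  have hcongr : List.filter (fun x => PySem.Set.contains (PySem.List.sorted (PySem.Set.ofList t2) (fun x => x) false) x)
        (PySem.List.sorted (PySem.Set.ofList t1) (fun x => x) false)
      = List.filter (fun x => PySem.Set.contains (PySem.Set.ofList t2) x)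
        (PySem.List.sorted (PySem.Set.ofList t1) (fun x => x) false) :=
    List.filter_congr (fun x _ => by
      simp only [PySem.Set.contains, List.contains_eq_mem, decide_eq_decide]
      exact h2.mem_iff)
  rw [hcongr]
  exact (h1.filter _).length_eq

-- A's per-pair test is B's per-class test on the two keys
lemma isLinked_eq (t1 t2 : List Int) :
    isLinked t1 t2 = if linkedB (keyOf t1) (keyOf t2) then some (t1, t2) else none := by
  unfold isLinked linkedB
  rw [inter_len_keyOf]
  have hl1 : (keyOf t1).1 = (t1.length : Int) := rfl
  have hl2 : (keyOf t2).1 = (t2.length : Int) := rfl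
  rw [hl1, hl2]
  by_cases h : (t1.length : Int) = (t2.length : Int)
  · simp only [h, beq_self_eq_true, Bool.true_and, if_true, min_self, max_self]
    have hfalse : (((t2.length : Int)) == ((t2.length : Int) - 1)) = false := by
      simp only [beq_eq_false_iff_ne, ne_eq]; omega
    simp [hfalse]
  · have hne : ((t1.length : Int) == (t2.length : Int)) = false := by
      simp only [beq_eq_false_iff_ne, ne_eq]; exact h
    simp only [hne, Bool.false_and, Bool.false_eq_true, if_false]
    have habs : (min (t1.length : Int) (t2.length : Int) == max (t1.length : Int) (t2.length : Int) - 1)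
        = (|(t1.length : Int) - (t2.length : Int)| == 1) := by
      rw [Bool.eq_iff_iff]
      simp only [beq_iff_eq]
      rcases le_total (t1.length : Int) (t2.length : Int) with hle | hle
      · rw [min_eq_left hle, max_eq_right hle, abs_sub_comm, abs_of_nonneg (by omega)]; omega
      · rw [min_eq_right hle, max_eq_left hle, abs_of_nonneg (by omega)]; omega
    rw [habs]

-- list.index of a member of reps points back at it
lemma reps_index (nodelist : List (List Int)) (k : Int × List Int) (hk : k ∈ pvReps nodelist) :
    ∃ h : ((PySem.List.index? (pvReps nodelist) k).getD 0) < (pvReps nodelist).length,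
      (pvReps nodelist)[(PySem.List.index? (pvReps nodelist) k).getD 0]'h = k := by
  have hsome : (List.idxOf? k (pvReps nodelist)).isSome := List.isSome_idxOf?.mpr hk
  obtain ⟨a, ha⟩ := Option.isSome_iff_exists.mp hsome
  have hidx : PySem.List.index? (pvReps nodelist) k = some a := ha
  obtain ⟨hlt, hget, -⟩ := List.idxOf?_eq_some_iff.mp ha
  rw [hidx]
  exact ⟨by simpa using hlt, by simpa using hget⟩

-- the table lookup B performs equals the direct class test on the two nodes' keys
lemma table_lookup (nodelist : List (List Int)) (i j : Int)
    (hi0 : 0 ≤ i) (hi : i < (nodelist.length : Int)) (hj0 : 0 ≤ j) (hj : j < (nodelist.length : Int)) :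
    PySem.List.pyGetD
        (PySem.List.pyGetD (pvTable nodelist) ((PySem.List.pyGetD (pvCls nodelist) i 0 : Nat) : Int) [])
        ((PySem.List.pyGetD (pvCls nodelist) j 0 : Nat) : Int) false
      = linkedB (keyOf (PySem.List.pyGetD nodelist i [])) (keyOf (PySem.List.pyGetD nodelist j [])) := by
  have hcls : ∀ (m : Int), 0 ≤ m → m < (nodelist.length : Int) →
      PySem.List.pyGetD (pvCls nodelist) m 0
        = (PySem.List.index? (pvReps nodelist) (keyOf (PySem.List.pyGetD nodelist m []))).getD 0 := by
    intro m hm0 hm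
    have hlen : ((pvCls nodelist).length : Int) = (nodelist.length : Int) := by
      simp [pvCls, pvKeys]
    rw [PySem.List.pyGetD_eq_getElem _ _ hm0 (by rw [hlen]; exact hm),
        PySem.List.pyGetD_eq_getElem _ _ hm0 hm]
    simp [pvCls, pvKeys]
  have hmem : ∀ (m : Int), 0 ≤ m → m < (nodelist.length : Int) →
      keyOf (PySem.List.pyGetD nodelist m []) ∈ pvReps nodelist := by
    intro m hm0 hm
    rw [PySem.List.pyGetD_eq_getElem _ _ hm0 hm]
    rw [pvReps, PySem.List.mem_dedup]
    exact List.mem_map_of_mem (List.getElem_mem _)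
  rw [hcls i hi0 hi, hcls j hj0 hj]
  obtain ⟨ha, hra⟩ := reps_index nodelist _ (hmem i hi0 hi)
  obtain ⟨hb, hrb⟩ := reps_index nodelist _ (hmem j hj0 hj)
  have hga : PySem.List.pyGetD (pvReps nodelist)
      (((PySem.List.index? (pvReps nodelist) (keyOf (PySem.List.pyGetD nodelist i []))).getD 0 : Nat) : Int) (0, [])
      = keyOf (PySem.List.pyGetD nodelist i []) := by
    rw [PySem.List.pyGetD_eq_getElem _ _ (Int.natCast_nonneg _) (by exact_mod_cast ha)]
    simpa using hra
  have hgb : PySem.List.pyGetD (pvReps nodelist)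
      (((PySem.List.index? (pvReps nodelist) (keyOf (PySem.List.pyGetD nodelist j []))).getD 0 : Nat) : Int) (0, [])
      = keyOf (PySem.List.pyGetD nodelist j []) := by
    rw [PySem.List.pyGetD_eq_getElem _ _ (Int.natCast_nonneg _) (by exact_mod_cast hb)]
    simpa using hrb
  rw [pvTable, PySem.List.pyGetD_map_pyRange _ _ _ _ ha, PySem.List.pyGetD_map_pyRange _ _ _ _ hb,
      hga, hgb]

lemma getEdges_eq (nodelist : List (List Int)) : getEdges nodelist = getEdges_alt nodelist := by
  unfold getEdges getEdges_alt
  have hA : ∀ (i : Int) (acc : List (List Int × List Int)),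
      (PySem.List.pyRange i (nodelist.length : Int) 1).foldl (fun edges j =>
        match isLinked (PySem.List.pyGetD nodelist i []) (PySem.List.pyGetD nodelist j []) with
        | some edge => edges ++ [edge]
        | none => edges) acc
      = acc ++ ((PySem.List.pyRange i (nodelist.length : Int) 1).filter (fun j =>
            linkedB (keyOf (PySem.List.pyGetD nodelist i [])) (keyOf (PySem.List.pyGetD nodelist j [])))).map
          (fun j => (PySem.List.pyGetD nodelist i [], PySem.List.pyGetD nodelist j [])) := by
    intro i acc
    have hfun : (fun (edges : List (List Int × List Int)) (j : Int) =>
        match isLinked (PySem.List.pyGetD nodelist i []) (PySem.List.pyGetD nodelist j []) with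
        | some edge => edges ++ [edge]
        | none => edges)
        = (fun edges j =>
            if linkedB (keyOf (PySem.List.pyGetD nodelist i [])) (keyOf (PySem.List.pyGetD nodelist j [])) then
              edges ++ [(PySem.List.pyGetD nodelist i [], PySem.List.pyGetD nodelist j [])]
            else edges) := by
      funext edges j
      rw [isLinked_eq]
      by_cases hb : linkedB (keyOf (PySem.List.pyGetD nodelist i [])) (keyOf (PySem.List.pyGetD nodelist j []))
      · simp [hb]
      · simp [hb]
    rw [hfun]
    exact PySem.List.foldl_append_if _ _ _ acc
  have houter : (fun (edges : List (List Int × List Int)) (i : Int) =>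
      (PySem.List.pyRange i (nodelist.length : Int) 1).foldl (fun edges j =>
        match isLinked (PySem.List.pyGetD nodelist i []) (PySem.List.pyGetD nodelist j []) with
        | some edge => edges ++ [edge]
        | none => edges) edges)
      = (fun edges i => edges ++ ((PySem.List.pyRange i (nodelist.length : Int) 1).filter (fun j =>
            linkedB (keyOf (PySem.List.pyGetD nodelist i [])) (keyOf (PySem.List.pyGetD nodelist j [])))).map
          (fun j => (PySem.List.pyGetD nodelist i [], PySem.List.pyGetD nodelist j []))) :=
    funext fun edges => funext fun i => hA i edges
  rw [houter, PySem.List.foldl_append_eq_flatMap]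
  simp only [List.nil_append]
  apply List.flatMap_congr
  intro i hi
  obtain ⟨hi0, hin⟩ := PySem.List.mem_pyRange_one.mp hi
  congr 1
  apply List.filter_congr
  intro j hj
  obtain ⟨hij, hjn⟩ := PySem.List.mem_pyRange_one.mp hj
  exact (table_lookup nodelist i j hi0 hin (le_trans hi0 hij) hjn).symm

-- ===== VERDICT (by name: the statement is the Claim_ definition above) =====
theorem getEdges_spec : Claim_equal_getEdges := by
  intro nodelist _
  unfold Spec_getEdges
  exact getEdges_eq nodelist
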